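-- pv_equiv track=rewrite | github.com/chron-sugi/coresplorer | tools/json_generator/src/generate.py | collect_transitive_edges
-- ===== SOURCE A (Python) =====
-- from collections import defaultdict, deque
--
-- def collect_transitive_edges(
--     start_id: str,
--     adjacency: dict[str, list[str]],
--     direction: str,
-- ) -> list[tuple[str, str]]:
--     """
--     BFS traversal to collect ALL transitive edges from a starting node.
--
--     Args:
--         start_id: The node to start traversal from
--         adjacency: Adjacency list (outgoing for downstream, incoming for upstream)
--         direction: "downstream" or "upstream" - determines edge orientation
--
--     Returns:
--         List of (source, target) tuples representing edges
--     """
--     edges: list[tuple[str, str]] = []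
--     visited_edges: set[tuple[str, str]] = set()
--     visited_nodes: set[str] = {start_id}
--     queue: deque[str] = deque([start_id])
--
--     while queue:
--         current_id = queue.popleft()
--         neighbors = adjacency.get(current_id, [])
--
--         for neighbor in neighbors:
--             # Determine edge direction based on traversal direction
--             if direction == "downstream":
--                 edge = (current_id, neighbor)
--             else:  # upstream
--                 edge = (neighbor, current_id)
--
--             if edge not in visited_edges:
--                 visited_edges.add(edge)
--                 edges.append(edge)
--
--             if neighbor not in visited_nodes:
--                 visited_nodes.add(neighbor)
--                 queue.append(neighbor)
--
--     return edges
-- ===== SOURCE B (Python) =====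
-- from collections import deque
--
-- def collect_transitive_edges(
--     start_id: str,
--     adjacency: dict[str, list[str]],
--     direction: str,
-- ) -> list[tuple[str, str]]:
--     # Phase 1: BFS from start_id, recording only the nodes in dequeue order.
--     visited_nodes = {start_id}
--     queue = deque([start_id])
--     order = []
--     while queue:
--         node = queue.popleft()
--         order.append(node)
--         for neighbor in adjacency.get(node, []):
--             if neighbor not in visited_nodes:
--                 visited_nodes.add(neighbor)
--                 queue.append(neighbor)
--     # Phase 2: walk the recorded node order and collect edges with dedup.
--     edges = []
--     seen = set()
--     for node in order:
--         for neighbor in adjacency.get(node, []):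
--             edge = (node, neighbor) if direction == "downstream" else (neighbor, node)
--             if edge not in seen:
--                 seen.add(edge)
--                 edges.append(edge)
--     return edges
-- ===== Notes on version B (the rewrite author's own statement) =====
-- stated objective: alternative
-- what changed: Splits A's fused BFS loop into two passes: phase 1 runs the BFS recording only the dequeue order of nodes, phase 2 walks that node order and collects/dedups the edges; traversal and edge collection are fully separated.
import Mathlib
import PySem

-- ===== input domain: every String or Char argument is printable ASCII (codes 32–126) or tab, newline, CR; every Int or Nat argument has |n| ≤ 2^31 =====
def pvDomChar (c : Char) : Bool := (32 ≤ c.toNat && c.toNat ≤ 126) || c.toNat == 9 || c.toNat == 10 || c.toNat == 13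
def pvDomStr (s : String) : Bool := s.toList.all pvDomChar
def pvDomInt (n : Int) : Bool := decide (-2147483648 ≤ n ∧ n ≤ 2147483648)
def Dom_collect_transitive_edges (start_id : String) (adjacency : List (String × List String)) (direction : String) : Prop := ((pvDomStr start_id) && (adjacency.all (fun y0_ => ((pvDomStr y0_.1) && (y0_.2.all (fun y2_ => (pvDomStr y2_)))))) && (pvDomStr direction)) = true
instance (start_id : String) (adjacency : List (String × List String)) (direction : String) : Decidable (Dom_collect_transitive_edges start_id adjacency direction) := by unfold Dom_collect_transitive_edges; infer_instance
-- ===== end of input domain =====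

-- B splits A's fused BFS loop into two passes (node-order BFS, then edge collection); alternative decomposition, same cost.


-- fuel bound shared by both ports: the BFS dequeues each node at most once, and every
-- enqueue beyond start_id consumes one neighbor occurrence, so 1 + Σ|neighbor lists|
-- iterations always suffice (pure totality device, not part of either algorithm).
def pvFuel (adjacency : List (String × List String)) : Nat :=
  1 + adjacency.foldl (fun a p => a + p.2.length) 0

-- ===== PORT A =====
-- A's single while-loop: state = (queue, visited_nodes, edges, visited_edges);
-- each dequeued node's neighbor loop updates edges/visited_edges and visited_nodes/queue together.
def pvALoop (adj : PySem.Dict String (List String)) (direction : String) :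
    Nat → List String → PySem.Set String →
    List (String × String) → PySem.Set (String × String) → List (String × String)
  | 0, _, _, edges, _ => edges
  | _ + 1, [], _, edges, _ => edges
  | fuel + 1, current :: rest, visited, edges, vedges =>
    let neighbors := adj.getD current []
    let st := neighbors.foldl
      (fun (s : (List (String × String) × PySem.Set (String × String)) × (PySem.Set String × List String)) nb =>
        let edge := if direction = "downstream" then (current, nb) else (nb, current)
        let es := if PySem.Set.contains s.1.2 edge then s.1
                  else (s.1.1 ++ [edge], PySem.Set.add s.1.2 edge)
        let vs := if PySem.Set.contains s.2.1 nb then s.2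
                  else (PySem.Set.add s.2.1 nb, s.2.2 ++ [nb])
        (es, vs))
      ((edges, vedges), (visited, rest))
    pvALoop adj direction fuel st.2.2 st.2.1 st.1.1 st.1.2

def collect_transitive_edges (start_id : String) (adjacency : List (String × List String)) (direction : String) : List (String × String) :=
  pvALoop (PySem.Dict.mk adjacency) direction (pvFuel adjacency)
    [start_id] (PySem.Set.ofList [start_id]) [] PySem.Set.empty

-- ===== PORT B =====
-- phase 1: BFS recording only the dequeue order of nodes
def pvBfsOrder (adj : PySem.Dict String (List String)) :
    Nat → List String → PySem.Set String → List String
  | 0, _, _ => []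
  | _ + 1, [], _ => []
  | fuel + 1, node :: rest, visited =>
    let st := (adj.getD node []).foldl
      (fun (s : PySem.Set String × List String) nb =>
        if PySem.Set.contains s.1 nb then s else (PySem.Set.add s.1 nb, s.2 ++ [nb]))
      (visited, rest)
    node :: pvBfsOrder adj fuel st.2 st.1

-- phase 2: collect edges along the recorded node order, with dedup
def pvEdgeStep (adj : PySem.Dict String (List String)) (direction : String)
    (s : List (String × String) × PySem.Set (String × String)) (node : String) :
    List (String × String) × PySem.Set (String × String) :=
  (adj.getD node []).foldl
    (fun s nb =>
      let edge := if direction = "downstream" then (node, nb) else (nb, node)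
      if PySem.Set.contains s.2 edge then s
      else (s.1 ++ [edge], PySem.Set.add s.2 edge)) s

def collect_transitive_edges_alt (start_id : String) (adjacency : List (String × List String)) (direction : String) : List (String × String) :=
  let adj := PySem.Dict.mk adjacency
  let order := pvBfsOrder adj (pvFuel adjacency) [start_id] (PySem.Set.ofList [start_id])
  (order.foldl (pvEdgeStep adj direction) ([], PySem.Set.empty)).1

-- ===== PRECONDITION & SPEC =====
def Spec_collect_transitive_edges (start_id : String) (adjacency : List (String × List String)) (direction : String) (out : List (String × String)) : Prop := out = collect_transitive_edges_alt start_id adjacency direction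
instance (start_id : String) (adjacency : List (String × List String)) (direction : String) (out : List (String × String)) : Decidable (Spec_collect_transitive_edges start_id adjacency direction out) := by unfold Spec_collect_transitive_edges; infer_instance

-- ===== CLAIM (what is proved, stated in full; the proofs are below) =====
def Claim_equal_collect_transitive_edges : Prop := ∀ (start_id : String) (adjacency : List (String × List String)) (direction : String), Dom_collect_transitive_edges start_id adjacency direction → Spec_collect_transitive_edges start_id adjacency direction (collect_transitive_edges start_id adjacency direction)

-- ===== LEMMAS AND PROOFS =====

-- A's fused neighbor fold splits into B's two independent folds (the edge half reads only
-- the edge state, the node half only the node state).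
theorem pvFold_split (direction current : String)
    (ns : List String)
    (e : List (String × String) × PySem.Set (String × String))
    (v : PySem.Set String × List String) :
    ns.foldl
      (fun (s : (List (String × String) × PySem.Set (String × String)) × (PySem.Set String × List String)) nb =>
        let edge := if direction = "downstream" then (current, nb) else (nb, current)
        let es := if PySem.Set.contains s.1.2 edge then s.1
                  else (s.1.1 ++ [edge], PySem.Set.add s.1.2 edge)
        let vs := if PySem.Set.contains s.2.1 nb then s.2
                  else (PySem.Set.add s.2.1 nb, s.2.2 ++ [nb])
        (es, vs))
      (e, v)
    = (ns.foldl
        (fun s nb =>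
          let edge := if direction = "downstream" then (current, nb) else (nb, current)
          if PySem.Set.contains s.2 edge then s
          else (s.1 ++ [edge], PySem.Set.add s.2 edge)) e,
       ns.foldl
        (fun (s : PySem.Set String × List String) nb =>
          if PySem.Set.contains s.1 nb then s else (PySem.Set.add s.1 nb, s.2 ++ [nb])) v) := by
  induction ns generalizing e v with
  | nil => rfl
  | cons nb ns ih =>
    simp only [List.foldl_cons]
    rw [ih]

-- main invariant: A's loop from any state equals phase 2 folded over phase 1's node order
theorem pvLoop_eq (adj : PySem.Dict String (List String)) (direction : String)
    (fuel : Nat) (queue : List String) (visited : PySem.Set String)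
    (edges : List (String × String)) (vedges : PySem.Set (String × String)) :
    pvALoop adj direction fuel queue visited edges vedges
      = ((pvBfsOrder adj fuel queue visited).foldl (pvEdgeStep adj direction) (edges, vedges)).1 := by
  induction fuel generalizing queue visited edges vedges with
  | zero => rfl
  | succ fuel ih =>
    cases queue with
    | nil => rfl
    | cons current rest =>
      simp only [pvALoop, pvBfsOrder, List.foldl_cons]
      rw [pvFold_split]
      simp only [pvEdgeStep]
      exact ih _ _ _ _

-- ===== VERDICT (by name: the statement is the Claim_ definition above) =====
theorem collect_transitive_edges_spec : Claim_equal_collect_transitive_edges := by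
  intro start_id adjacency direction _
  show collect_transitive_edges start_id adjacency direction = _
  unfold collect_transitive_edges collect_transitive_edges_alt
  exact pvLoop_eq _ _ _ _ _ _ _
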